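-- pv_equiv track=rewrite | github.com/laoliu-463/mybook | 脚本/读写笔记.py | ordered_frontmatter
-- ===== SOURCE A (Python) =====
-- from typing import Any
--
-- REQUIRED_FRONTMATTER_ORDER = [
--     "title",
--     "type",
--     "domain",
--     "tags",
--     "source",
--     "created",
--     "status",
-- ]
--
-- def ordered_frontmatter(frontmatter: dict[str, Any]) -> dict[str, Any]:
--     ordered: dict[str, Any] = {}
--     for key in REQUIRED_FRONTMATTER_ORDER:
--         if key in frontmatter:
--             ordered[key] = frontmatter[key]
--     for key, value in frontmatter.items():
--         if key not in ordered:
--             ordered[key] = value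
--     return ordered
-- ===== SOURCE B (Python) =====
-- REQUIRED_FRONTMATTER_ORDER = [
--     "title",
--     "type",
--     "domain",
--     "tags",
--     "source",
--     "created",
--     "status",
-- ]
--
-- def ordered_frontmatter(frontmatter):
--     n = len(REQUIRED_FRONTMATTER_ORDER)
--     rank = {key: i for i, key in enumerate(REQUIRED_FRONTMATTER_ORDER)}
--     buckets = {}
--     for key, value in frontmatter.items():
--         buckets.setdefault(rank.get(key, n), []).append((key, value))
--     return {key: value for j in range(n + 1) for key, value in buckets.get(j, [])}
-- ===== Notes on version B (the rewrite author's own statement) =====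
-- stated objective: alternative
-- what changed: A's two selective passes (one over the required-key list with membership tests, then one over the dict skipping already-inserted keys) are replaced by a rank table built from enumerate plus a single bucket-grouping pass over the dict; the result is the concatenation of the rank buckets, so no per-required-key membership scan or 'already inserted' check remains.
import Mathlib
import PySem

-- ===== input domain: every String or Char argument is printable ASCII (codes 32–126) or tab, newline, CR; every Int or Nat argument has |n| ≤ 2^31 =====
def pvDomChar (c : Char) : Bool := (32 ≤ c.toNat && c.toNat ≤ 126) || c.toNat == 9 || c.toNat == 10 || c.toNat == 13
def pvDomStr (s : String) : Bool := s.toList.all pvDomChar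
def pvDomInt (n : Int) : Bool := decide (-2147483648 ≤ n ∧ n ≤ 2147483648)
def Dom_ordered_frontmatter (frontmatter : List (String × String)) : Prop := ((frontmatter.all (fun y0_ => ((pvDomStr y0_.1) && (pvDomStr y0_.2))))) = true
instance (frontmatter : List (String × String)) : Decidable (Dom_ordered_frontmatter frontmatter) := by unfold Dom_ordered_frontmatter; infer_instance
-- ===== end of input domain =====

-- B replaces A's two selective passes (one over the required-key list, one over the dict) by a
-- rank table and a one-pass bucket grouping keyed by rank; same cost, different decomposition ("alternative").

def REQUIRED_FRONTMATTER_ORDER : List String :=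
  ["title", "type", "domain", "tags", "source", "created", "status"]

-- ===== PORT A =====
def ordered_frontmatter (frontmatter : List (String × String)) : List (String × String) :=
  let fm : PySem.Dict String String := PySem.Dict.mk frontmatter
  let ordered : PySem.Dict String String :=
    REQUIRED_FRONTMATTER_ORDER.foldl
      (fun ordered key =>
        if fm.contains key then ordered.insert key (fm.getD key "") else ordered)
      PySem.Dict.empty
  let ordered :=
    fm.items.foldl
      (fun ordered kv =>
        if !(ordered.contains kv.1) then ordered.insert kv.1 kv.2 else ordered)
      ordered
  ordered.items

-- ===== PORT B =====
-- rank = {key: i for i, key in enumerate(REQUIRED_FRONTMATTER_ORDER)}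
def pvRank : PySem.Dict String Int :=
  (PySem.List.enumerate REQUIRED_FRONTMATTER_ORDER 0).foldl
    (fun d p => d.insert p.2 p.1) PySem.Dict.empty

def ordered_frontmatter_alt (frontmatter : List (String × String)) : List (String × String) :=
  let fm : PySem.Dict String String := PySem.Dict.mk frontmatter
  let n : Int := PySem.List.len REQUIRED_FRONTMATTER_ORDER
  let buckets : PySem.Dict Int (List (String × String)) :=
    fm.items.foldl
      (fun buckets kv => buckets.modify (pvRank.getD kv.1 n) [] (fun b => b ++ [kv]))
      PySem.Dict.empty
  let pairs : List (String × String) :=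
    (PySem.List.pyRange 0 (n + 1) 1).foldl (fun acc j => acc ++ buckets.getD j []) []
  (pairs.foldl (fun d kv => d.insert kv.1 kv.2)
      (PySem.Dict.empty : PySem.Dict String String)).items

-- ===== PRECONDITION & SPEC =====
-- The argument is a Python dict, whose keys are necessarily distinct; Pre_ excludes association
-- lists with duplicate keys, which represent no Python dict value.
def Pre_ordered_frontmatter (frontmatter : List (String × String)) : Prop :=
  (frontmatter.map Prod.fst).Nodup
instance (frontmatter : List (String × String)) : Decidable (Pre_ordered_frontmatter frontmatter) := by
  unfold Pre_ordered_frontmatter; infer_instance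

def pvWitness_ordered_frontmatter : (List (String × String)) :=
  [("title", "My note"), ("extra", "1"), ("type", "note")]

def Spec_ordered_frontmatter (frontmatter : List (String × String)) (out : List (String × String)) : Prop := out = ordered_frontmatter_alt frontmatter
instance (frontmatter : List (String × String)) (out : List (String × String)) : Decidable (Spec_ordered_frontmatter frontmatter out) := by unfold Spec_ordered_frontmatter; infer_instance

-- ===== CLAIM (what is proved, stated in full; the proofs are below) =====
def Claim_equal_ordered_frontmatter : Prop := ∀ (frontmatter : List (String × String)), Dom_ordered_frontmatter frontmatter → Pre_ordered_frontmatter frontmatter → Spec_ordered_frontmatter frontmatter (ordered_frontmatter frontmatter)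

-- ===== LEMMAS AND PROOFS =====

-- A's first loop: over a duplicate-free key list, inserting the keys present in d appends them.
theorem pvFoldA1_items (d : PySem.Dict String String) (ks : List String) :
    ∀ (e : PySem.Dict String String), ks.Nodup → e.keys.Nodup →
    (∀ k ∈ ks, e.contains k = false) →
    (ks.foldl (fun o k => if d.contains k then o.insert k (d.getD k "") else o) e).items
      = e.items ++ ks.filterMap (fun k => (d.get? k).map (fun v => (k, v))) := by
  induction ks with
  | nil => intro e _ _ _; simp
  | cons k t ih =>
    intro e hk he hdisj
    simp only [List.foldl_cons, List.filterMap_cons]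
    rcases hc : d.contains k with _ | _
    · have hg : d.get? k = none := by
        rw [PySem.Dict.get?_eq_none_iff_contains]; exact hc
      rw [if_neg (by simp), hg]
      simpa using ih e hk.of_cons he (fun k' hk' => hdisj k' (List.mem_cons_of_mem _ hk'))
    · obtain ⟨v, hv⟩ : ∃ v, d.get? k = some v := by
        have h2 := PySem.Dict.contains_eq_isSome_get? (d := d) (k := k)
        rw [hc] at h2
        exact Option.isSome_iff_exists.mp h2.symm
      have hgd : d.getD k "" = v := PySem.Dict.getD_of_get?_eq_some d "" hv
      have hek : e.contains k = false := hdisj k (List.mem_cons_self)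
      rw [if_pos rfl, hv]
      rw [ih (e.insert k (d.getD k "")) hk.of_cons
          (PySem.Dict.nodup_keys_insert _ _ _ he)
          (by
            intro k' hk'
            rw [PySem.Dict.contains_insert]
            have hne : k' ≠ k := by
              rintro rfl; exact (List.nodup_cons.mp hk).1 hk'
            have hb : (k' == k) = false := by simp [hne]
            simp [hb, hdisj k' (List.mem_cons_of_mem _ hk')])]
      rw [PySem.Dict.items_insert_of_not_contains _ _ hek, hgd]
      simp

-- contains after A's first loop: exactly the required keys that are present in d.
theorem pvFoldA1_contains (d : PySem.Dict String String) (ks : List String) (x : String) :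
    ∀ (e : PySem.Dict String String),
    (ks.foldl (fun o k => if d.contains k then o.insert k (d.getD k "") else o) e).contains x
      = (e.contains x || (decide (x ∈ ks) && d.contains x)) := by
  induction ks with
  | nil => intro e; simp
  | cons k t ih =>
    intro e
    simp only [List.foldl_cons]
    rcases hc : d.contains k with _ | _
    · rw [if_neg (by simp), ih]
      by_cases hx : x = k
      · subst hx; simp [hc]
      · simp [hx]
    · rw [if_pos rfl, ih, PySem.Dict.contains_insert]
      by_cases hx : x = k
      · subst hx; simp [hc]
      · have hb : (x == k) = false := by simp [hx]
        simp [hb, hx]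

-- A's second loop: appends exactly the pairs whose key is not already present.
theorem pvFoldA2_items (l : List (String × String)) :
    ∀ (e : PySem.Dict String String), (l.map Prod.fst).Nodup → e.keys.Nodup →
    (l.foldl (fun o kv => if !(o.contains kv.1) then o.insert kv.1 kv.2 else o) e).items
      = e.items ++ l.filter (fun kv => !(e.contains kv.1)) := by
  induction l with
  | nil => intro e _ _; simp
  | cons kv t ih =>
    intro e hl he
    simp only [List.foldl_cons, List.filter_cons]
    rcases hc : e.contains kv.1 with _ | _
    · rw [if_pos (by simp)]
      rw [ih (e.insert kv.1 kv.2) (by simpa using hl.of_cons)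
          (PySem.Dict.nodup_keys_insert _ _ _ he)]
      rw [PySem.Dict.items_insert_of_not_contains _ _ hc]
      have hfc : t.filter (fun p => !((e.insert kv.1 kv.2).contains p.1))
          = t.filter (fun p => !(e.contains p.1)) := by
        apply List.filter_congr
        intro p hp
        rw [PySem.Dict.contains_insert]
        have hl1 : kv.1 ∉ t.map Prod.fst := by
          have hl' : (kv.1 :: t.map Prod.fst).Nodup := by simpa using hl
          exact (List.nodup_cons.mp hl').1
        have hne : p.1 ≠ kv.1 := by
          intro h
          exact hl1 (h ▸ List.mem_map_of_mem (f := Prod.fst) hp)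
        have hb : (p.1 == kv.1) = false := by simp [hne]
        simp [hb]
      rw [hfc]
      simp
    · rw [if_neg (by simp)]
      rw [ih e (by simpa using hl.of_cons) he]
      simp

-- keys of Dict.mk l are the first components of l
theorem pvContains_mk_of_mem (l : List (String × String)) (kv : String × String)
    (h : kv ∈ l) : (PySem.Dict.mk l).contains kv.1 = true := by
  rw [PySem.Dict.contains_iff_mem_keys]
  have : (PySem.Dict.mk l).keys = l.map Prod.fst := rfl
  rw [this]
  exact List.mem_map_of_mem h

-- with duplicate-free keys, filtering l for one key yields the (unique) dict entry
theorem pvFilter_key_eq (l : List (String × String)) (k : String) :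
    (l.map Prod.fst).Nodup →
    l.filter (fun kv => kv.1 == k)
      = ((PySem.Dict.mk l).get? k).elim [] (fun v => [(k, v)]) := by
  induction l with
  | nil =>
    intro _
    simp [show (PySem.Dict.mk ([] : List (String × String))).get? k = none from rfl]
  | cons kv t ih =>
    intro hl
    have hl1 : kv.1 ∉ t.map Prod.fst ∧ (t.map Prod.fst).Nodup := by
      have hl' : (kv.1 :: t.map Prod.fst).Nodup := by simpa using hl
      exact List.nodup_cons.mp hl' 
    rw [List.filter_cons, PySem.Dict.get?_mk_cons]
    by_cases h : kv.1 = k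
    · subst h
      have ht : t.filter (fun p => p.1 == kv.1) = [] := by
        rw [List.filter_eq_nil_iff]
        intro p hp
        have hne : p.1 ≠ kv.1 := fun he => hl1.1 (he ▸ List.mem_map_of_mem (f := Prod.fst) hp)
        simp [hne]
      simp [ht]
    · have hb : (kv.1 == k) = false := by simp [h]
      simp only [hb, Bool.false_eq_true]
      simpa using ih hl1.2

-- rank lookups, closed form
theorem pvRank_getD (k : String) :
    pvRank.getD k 7
      = if k = "title" then 0 else if k = "type" then 1 else if k = "domain" then 2
        else if k = "tags" then 3 else if k = "source" then 4 else if k = "created" then 5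
        else if k = "status" then 6 else 7 := by
  have hmk : pvRank = PySem.Dict.mk
      [("title", (0 : Int)), ("type", 1), ("domain", 2), ("tags", 3),
       ("source", 4), ("created", 5), ("status", 6)] := by decide
  by_cases h1 : k = "title"; · subst h1; decide
  by_cases h2 : k = "type"; · subst h2; decide
  by_cases h3 : k = "domain"; · subst h3; decide
  by_cases h4 : k = "tags"; · subst h4; decide
  by_cases h5 : k = "source"; · subst h5; decide
  by_cases h6 : k = "created"; · subst h6; decide
  by_cases h7 : k = "status"; · subst h7; decide
  rw [hmk]
  simp [PySem.Dict.getD_eq_get?_getD, PySem.Dict.get?_mk_cons,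
    Ne.symm h1, Ne.symm h2, Ne.symm h3, Ne.symm h4, Ne.symm h5, Ne.symm h6, Ne.symm h7,
    h1, h2, h3, h4, h5, h6, h7]
  rfl

-- the j-th bucket predicate, for the seven required ranks
theorem pvRank_bucket (k : String) (j : Int) (hj : 0 ≤ j) (hj7 : j < 7) :
    (pvRank.getD k 7 == j) = (k == REQUIRED_FRONTMATTER_ORDER[j.toNat]!) := by
  rw [pvRank_getD]
  interval_cases j <;>
    split_ifs with h1 h2 h3 h4 h5 h6 h7 <;>
      simp_all [REQUIRED_FRONTMATTER_ORDER]

-- the overflow bucket predicate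
theorem pvRank_rest (k : String) :
    (pvRank.getD k 7 == (7 : Int)) = !(decide (k ∈ REQUIRED_FRONTMATTER_ORDER)) := by
  rw [pvRank_getD]
  split_ifs with h1 h2 h3 h4 h5 h6 h7 <;>
    simp_all [REQUIRED_FRONTMATTER_ORDER]

-- the filterMap over required keys has duplicate-free keys, all inside ks
theorem pvReqPart_keys (d : PySem.Dict String String) (ks : List String) (hk : ks.Nodup) :
    ((ks.filterMap (fun k => (d.get? k).map (fun v => (k, v)))).map Prod.fst).Nodup
      ∧ ∀ x ∈ (ks.filterMap (fun k => (d.get? k).map (fun v => (k, v)))).map Prod.fst, x ∈ ks := by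
  induction ks with
  | nil => simp
  | cons k t ih =>
    obtain ⟨ihn, ihm⟩ := ih hk.of_cons
    rcases hg : d.get? k with _ | v
    · simp only [List.filterMap_cons, hg, Option.map_none]
      exact ⟨ihn, fun x hx => List.mem_cons_of_mem _ (ihm x hx)⟩
    · simp only [List.filterMap_cons, hg, Option.map_some, List.map_cons]
      constructor
      · rw [List.nodup_cons]
        exact ⟨fun hmem => (List.nodup_cons.mp hk).1 (ihm k hmem), ihn⟩
      · intro x hx
        rcases List.mem_cons.mp hx with h | h
        · exact h ▸ List.mem_cons_self
        · exact List.mem_cons_of_mem _ (ihm x h)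

-- a fold of list-appends over a literal range, unfolded
theorem pvConcat8 (g : Int → List (String × String)) :
    (PySem.List.pyRange 0 8 1).foldl (fun acc j => acc ++ g j) []
      = g 0 ++ g 1 ++ g 2 ++ g 3 ++ g 4 ++ g 5 ++ g 6 ++ g 7 := by
  have : PySem.List.pyRange 0 8 1 = [0, 1, 2, 3, 4, 5, 6, 7] := by decide
  rw [this]
  simp [List.foldl]

-- filterMap over a cons, as an Option.elim append
theorem pvFilterMap_cons {α β : Type} (f : α → Option β) (a : α) (l : List α) :
    List.filterMap f (a :: l) = (f a).elim [] (fun b => [b]) ++ List.filterMap f l := by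
  cases h : f a <;> simp [h]

theorem pvElimMap (o : Option String) (k : String) :
    ((o.map (fun v => (k, v))).elim [] (fun b => [b]) : List (String × String))
      = o.elim [] (fun v => [(k, v)]) := by
  cases o <;> simp

theorem ordered_frontmatter_spec : Claim_equal_ordered_frontmatter := by
  intro fmt _ hpre
  unfold Spec_ordered_frontmatter
  have hnodReq : REQUIRED_FRONTMATTER_ORDER.Nodup := by decide
  -- shared abbreviations
  have hreqk := pvReqPart_keys (PySem.Dict.mk fmt) REQUIRED_FRONTMATTER_ORDER hnodReq
  -- ===== A side =====
  have h1 := pvFoldA1_items (PySem.Dict.mk fmt) REQUIRED_FRONTMATTER_ORDER PySem.Dict.empty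
      hnodReq (by simp) (by intro k _; simp)
  have hr1keys : (REQUIRED_FRONTMATTER_ORDER.foldl
      (fun o k => if (PySem.Dict.mk fmt).contains k then o.insert k ((PySem.Dict.mk fmt).getD k "") else o)
      PySem.Dict.empty).keys.Nodup := by
    have hkeys : ∀ (dd : PySem.Dict String String), dd.keys = dd.items.map Prod.fst := fun _ => rfl
    rw [hkeys, h1]
    simpa using hreqk.1
  have h2 := pvFoldA2_items fmt _ hpre hr1keys
  have h3 : fmt.filter (fun kv => !((REQUIRED_FRONTMATTER_ORDER.foldl
      (fun o k => if (PySem.Dict.mk fmt).contains k then o.insert k ((PySem.Dict.mk fmt).getD k "") else o)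
      PySem.Dict.empty).contains kv.1))
      = fmt.filter (fun kv => !(decide (kv.1 ∈ REQUIRED_FRONTMATTER_ORDER))) := by
    apply List.filter_congr
    intro p hp
    rw [pvFoldA1_contains]
    simp [pvContains_mk_of_mem fmt p hp]
  have hA : ordered_frontmatter fmt
      = REQUIRED_FRONTMATTER_ORDER.filterMap
          (fun k => ((PySem.Dict.mk fmt).get? k).map (fun v => (k, v)))
        ++ fmt.filter (fun kv => !(decide (kv.1 ∈ REQUIRED_FRONTMATTER_ORDER))) := by
    simp only [ordered_frontmatter]
    rw [h2, h1, h3]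
    simp [show (PySem.Dict.empty : PySem.Dict String String).items = [] from rfl]
  -- ===== B side =====
  have hlen : PySem.List.len REQUIRED_FRONTMATTER_ORDER = 7 := by decide
  have hbk : ∀ (j : Int), (fmt.foldl
        (fun b kv => b.modify (pvRank.getD kv.1 7) [] (fun l => l ++ [kv]))
        PySem.Dict.empty).getD j []
      = fmt.filter (fun kv => pvRank.getD kv.1 7 == j) := by
    intro j
    have hm : fmt.foldl (fun b kv => b.modify (pvRank.getD kv.1 7) [] (fun l => l ++ [kv])) PySem.Dict.empty
        = (fmt.map (fun kv => (pvRank.getD kv.1 7, kv))).foldl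
            (fun b p => b.modify p.1 [] (fun l => l ++ [p.2])) PySem.Dict.empty := by
      rw [List.foldl_map]
    rw [hm, PySem.Dict.getD_foldl_modify_append]
    simp [List.filter_map, Function.comp_def]
  have hO : ∀ (j : Int) (k : String), 0 ≤ j → j < 7 → REQUIRED_FRONTMATTER_ORDER[j.toNat]! = k →
      fmt.filter (fun kv => pvRank.getD kv.1 7 == j)
        = ((PySem.Dict.mk fmt).get? k).elim [] (fun v => [(k, v)]) := by
    intro j k hj0 hj7 hk
    rw [List.filter_congr (fun p _ => pvRank_bucket p.1 j hj0 hj7), hk]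
    exact pvFilter_key_eq fmt k hpre
  have hR : fmt.filter (fun kv => pvRank.getD kv.1 7 == (7 : Int))
      = fmt.filter (fun kv => !(decide (kv.1 ∈ REQUIRED_FRONTMATTER_ORDER))) :=
    List.filter_congr (fun p _ => pvRank_rest p.1)
  have hreq : REQUIRED_FRONTMATTER_ORDER.filterMap
        (fun k => ((PySem.Dict.mk fmt).get? k).map (fun v => (k, v)))
      = ((PySem.Dict.mk fmt).get? "title").elim [] (fun v => [("title", v)])
        ++ ((PySem.Dict.mk fmt).get? "type").elim [] (fun v => [("type", v)])
        ++ ((PySem.Dict.mk fmt).get? "domain").elim [] (fun v => [("domain", v)])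
        ++ ((PySem.Dict.mk fmt).get? "tags").elim [] (fun v => [("tags", v)])
        ++ ((PySem.Dict.mk fmt).get? "source").elim [] (fun v => [("source", v)])
        ++ ((PySem.Dict.mk fmt).get? "created").elim [] (fun v => [("created", v)])
        ++ ((PySem.Dict.mk fmt).get? "status").elim [] (fun v => [("status", v)]) := by
    show List.filterMap _ ("title" :: "type" :: "domain" :: "tags" :: "source" :: "created" :: "status" :: []) = _
    rw [pvFilterMap_cons, pvFilterMap_cons, pvFilterMap_cons, pvFilterMap_cons,
        pvFilterMap_cons, pvFilterMap_cons, pvFilterMap_cons]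
    simp only [pvElimMap, List.filterMap_nil, List.append_nil, List.append_assoc]
  have hpairs : (PySem.List.pyRange 0 (7 + 1) 1).foldl
        (fun acc j => acc ++ (fmt.foldl
          (fun b kv => b.modify (pvRank.getD kv.1 7) [] (fun l => l ++ [kv]))
          PySem.Dict.empty).getD j []) []
      = REQUIRED_FRONTMATTER_ORDER.filterMap
          (fun k => ((PySem.Dict.mk fmt).get? k).map (fun v => (k, v)))
        ++ fmt.filter (fun kv => !(decide (kv.1 ∈ REQUIRED_FRONTMATTER_ORDER))) := by
    have h8 : (7 : Int) + 1 = 8 := by norm_num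
    rw [h8, pvConcat8, hbk 0, hbk 1, hbk 2, hbk 3, hbk 4, hbk 5, hbk 6, hbk 7,
        hO 0 "title" (by norm_num) (by norm_num) (by decide),
        hO 1 "type" (by norm_num) (by norm_num) (by decide),
        hO 2 "domain" (by norm_num) (by norm_num) (by decide),
        hO 3 "tags" (by norm_num) (by norm_num) (by decide),
        hO 4 "source" (by norm_num) (by norm_num) (by decide),
        hO 5 "created" (by norm_num) (by norm_num) (by decide),
        hO 6 "status" (by norm_num) (by norm_num) (by decide),
        hR, hreq]
  -- keys of the concatenation are duplicate-free
  have hnodL : ((REQUIRED_FRONTMATTER_ORDER.filterMap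
          (fun k => ((PySem.Dict.mk fmt).get? k).map (fun v => (k, v)))
        ++ fmt.filter (fun kv => !(decide (kv.1 ∈ REQUIRED_FRONTMATTER_ORDER)))).map Prod.fst).Nodup := by
    rw [List.map_append, List.nodup_append]
    refine ⟨hreqk.1, ?_, ?_⟩
    · exact hpre.sublist (List.Sublist.map Prod.fst List.filter_sublist)
    · intro x hx y hy
      have hxin : x ∈ REQUIRED_FRONTMATTER_ORDER := hreqk.2 x hx
      obtain ⟨p, hp, rfl⟩ := List.mem_map.mp hy
      have hnp := (List.mem_filter.mp hp).2
      simp at hnp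
      intro hxy
      exact hnp (hxy ▸ hxin)
  have hB : ordered_frontmatter_alt fmt
      = REQUIRED_FRONTMATTER_ORDER.filterMap
          (fun k => ((PySem.Dict.mk fmt).get? k).map (fun v => (k, v)))
        ++ fmt.filter (fun kv => !(decide (kv.1 ∈ REQUIRED_FRONTMATTER_ORDER))) := by
    simp only [ordered_frontmatter_alt, hlen]
    rw [hpairs]
    exact (PySem.Dict.items_foldl_insert_fresh _ Prod.fst Prod.snd PySem.Dict.empty
      (by intro a _; simp) hnodL).trans
      (by simp [show (PySem.Dict.empty : PySem.Dict String String).items = [] from rfl])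
  rw [hA, hB]
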